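-- pv_equiv track=rewrite | github.com/vkdev08/Aspire-AI | ai_career_buddy/app.py | pick_interest_phrase
-- ===== SOURCE A (Python) =====
-- INTEREST_FRIENDLY_NAMES = {
--     "science": "science adventures",
--     "technology": "coding and technology ideas",
--     "math": "math puzzles",
--     "art": "creative projects",
--     "sports": "sports challenges",
--     "nature": "nature discoveries",
--     "animals": "animal stories",
--     "helping": "careers that help people",
-- }
--
-- def pick_interest_phrase(interest_tags):
--     """Convert stored interest tags into a friendly phrase"""
--     if not interest_tags:
--         return None
--     for tag in reversed(interest_tags):
--         phrase = INTEREST_FRIENDLY_NAMES.get(tag)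
--         if phrase:
--             return phrase
--     return None
-- ===== SOURCE B (Python) =====
-- INTEREST_FRIENDLY_NAMES = {
--     "science": "science adventures",
--     "technology": "coding and technology ideas",
--     "math": "math puzzles",
--     "art": "creative projects",
--     "sports": "sports challenges",
--     "nature": "nature discoveries",
--     "animals": "animal stories",
--     "helping": "careers that help people",
-- }
--
-- def pick_interest_phrase(interest_tags):
--     """Convert stored interest tags into a friendly phrase"""
--     result = None
--     for tag in interest_tags:
--         phrase = INTEREST_FRIENDLY_NAMES.get(tag)
--         if phrase:
--             result = phrase
--     return result
-- ===== Notes on version B (the rewrite author's own statement) =====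
-- stated objective: simpler
-- what changed: Replaced the reverse-order early-return scan (with a separate empty-list guard) by a single forward pass that keeps the last truthy phrase in an accumulator and returns it, no guard or early exit needed.
import Mathlib
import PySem

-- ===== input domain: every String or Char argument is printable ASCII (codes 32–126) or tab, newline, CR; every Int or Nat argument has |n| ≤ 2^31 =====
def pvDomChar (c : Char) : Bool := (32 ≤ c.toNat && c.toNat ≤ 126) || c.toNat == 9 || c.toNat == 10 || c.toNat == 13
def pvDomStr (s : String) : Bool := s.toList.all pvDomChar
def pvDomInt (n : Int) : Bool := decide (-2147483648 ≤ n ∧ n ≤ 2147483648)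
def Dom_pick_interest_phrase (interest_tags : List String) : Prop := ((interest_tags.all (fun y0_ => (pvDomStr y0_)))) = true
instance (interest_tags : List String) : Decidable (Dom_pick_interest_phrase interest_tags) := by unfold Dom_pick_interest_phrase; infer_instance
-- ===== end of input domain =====

-- B replaces A's reverse-order early-return scan (plus empty-list guard) by one forward pass
-- keeping the last truthy phrase in an accumulator; objective: simpler.

-- ===== PORT A =====
def INTEREST_FRIENDLY_NAMES : PySem.Dict String String :=
  PySem.Dict.ofList [
    ("science", "science adventures"),
    ("technology", "coding and technology ideas"),
    ("math", "math puzzles"),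
    ("art", "creative projects"),
    ("sports", "sports challenges"),
    ("nature", "nature discoveries"),
    ("animals", "animal stories"),
    ("helping", "careers that help people")]

-- A's loop over reversed(interest_tags): return the first truthy phrase, else None.
def pickLoopA : List String → Option String
  | [] => none
  | tag :: rest =>
    match INTEREST_FRIENDLY_NAMES.get? tag with
    | some phrase => if phrase ≠ "" then some phrase else pickLoopA rest
    | none => pickLoopA rest

def pick_interest_phrase (interest_tags : List String) : Option String :=
  if interest_tags = [] then none
  else pickLoopA interest_tags.reverse

-- ===== PORT B =====
def pick_interest_phrase_alt (interest_tags : List String) : Option String :=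
  interest_tags.foldl
    (fun result tag =>
      match INTEREST_FRIENDLY_NAMES.get? tag with
      | some phrase => if phrase ≠ "" then some phrase else result
      | none => result)
    none

-- ===== PRECONDITION & SPEC =====
def Spec_pick_interest_phrase (interest_tags : List String) (out : Option String) : Prop := out = pick_interest_phrase_alt interest_tags
instance (interest_tags : List String) (out : Option String) : Decidable (Spec_pick_interest_phrase interest_tags out) := by unfold Spec_pick_interest_phrase; infer_instance

-- ===== CLAIM (what is proved, stated in full; the proofs are below) =====
def Claim_equal_pick_interest_phrase : Prop := ∀ (interest_tags : List String), Dom_pick_interest_phrase interest_tags → Spec_pick_interest_phrase interest_tags (pick_interest_phrase interest_tags)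

-- ===== LEMMAS AND PROOFS =====

-- The reverse-scan-with-early-return equals the forward fold keeping the last truthy phrase.
theorem pickLoopA_reverse_eq_foldl (l : List String) :
    pickLoopA l.reverse = pick_interest_phrase_alt l := by
  induction l using List.reverseRecOn with
  | nil => rfl
  | append_singleton l x ih =>
    unfold pick_interest_phrase_alt at *
    rw [List.reverse_append, List.foldl_append]
    simp only [List.reverse_singleton, List.singleton_append, List.foldl_cons, List.foldl_nil,
      pickLoopA]
    rcases h : INTEREST_FRIENDLY_NAMES.get? x with _ | phrase
    · exact ih
    · by_cases hp : phrase ≠ "" <;> simp [hp, ih]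

-- ===== VERDICT (by name: the statement is the Claim_ definition above) =====
theorem pick_interest_phrase_spec : Claim_equal_pick_interest_phrase := by
  intro l _
  unfold Spec_pick_interest_phrase pick_interest_phrase
  rcases l with _ | ⟨x, xs⟩
  · rfl
  · rw [if_neg (by simp)]
    exact pickLoopA_reverse_eq_foldl (x :: xs)
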